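-- pv_equiv track=rewrite | github.com/theri6v/CodeSprintSolutions | GeekForGeek/Problem Of The Day/Print Pattern.py | pattern
-- ===== SOURCE A (Python) =====
-- def pattern(N):
--     # code here
--     p=N
--     li=[]
--     while N>0:
--         li.append(N)
--         N-=5
--     while(N<=p):
--         li.append(N)
--         N+=5
--     return li
-- ===== SOURCE B (Python) =====
-- def pattern(N):
--     # Build the descending half (including the single center value <= 0),
--     # then mirror it back up excluding the center.
--     half = []
--     x = N
--     while True:
--         half.append(x)
--         if x <= 0:
--             break
--         x -= 5
--     return half + half[:-1][::-1]
-- ===== Notes on version B (the rewrite author's own statement) =====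
-- stated objective: faster
-- what changed: A runs two independent counting loops (down by 5 while positive, then back up to N); B builds only the descending half in one loop and mirrors it with a reversed slice, exploiting that the output is a palindrome.
import Mathlib
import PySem

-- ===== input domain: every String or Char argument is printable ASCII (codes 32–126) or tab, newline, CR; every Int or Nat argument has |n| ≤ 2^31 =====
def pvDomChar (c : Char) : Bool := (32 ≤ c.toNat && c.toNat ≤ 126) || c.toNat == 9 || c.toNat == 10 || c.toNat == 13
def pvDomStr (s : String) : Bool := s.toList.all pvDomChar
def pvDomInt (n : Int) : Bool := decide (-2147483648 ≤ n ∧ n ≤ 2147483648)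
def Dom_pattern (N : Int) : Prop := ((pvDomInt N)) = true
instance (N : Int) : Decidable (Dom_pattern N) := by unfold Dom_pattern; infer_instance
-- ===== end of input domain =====

-- B changes the decomposition (one descending loop + slice mirror instead of two counting
-- loops); equivalence of the return values is proved on all inputs.

-- ===== PORT A =====
-- first loop: while N>0: li.append(N); N -= 5
def patternDown (N : Int) (li : List Int) : List Int × Int :=
  if N > 0 then patternDown (N - 5) (li ++ [N]) else (li, N)
termination_by N.toNat
decreasing_by omega

-- second loop: while N<=p: li.append(N); N += 5
def patternUp (N : Int) (p : Int) (li : List Int) : List Int :=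
  if N ≤ p then patternUp (N + 5) p (li ++ [N]) else li
termination_by (p + 5 - N).toNat
decreasing_by omega

def pattern (N : Int) : List Int :=
  let p := N
  let r := patternDown N []
  patternUp r.2 p r.1

-- ===== PORT B =====
-- the while True loop: append x; break once x <= 0; else x -= 5
def patternHalf (x : Int) : List Int :=
  if x ≤ 0 then [x] else x :: patternHalf (x - 5)
termination_by x.toNat
decreasing_by omega

def pattern_alt (N : Int) : List Int :=
  let half := patternHalf N
  half ++ (PySem.List.slice? (PySem.List.slice half none (some (-1))) none none (-1)).getD []

-- ===== PRECONDITION & SPEC =====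
def Spec_pattern (N : Int) (out : List Int) : Prop := out = pattern_alt N
instance (N : Int) (out : List Int) : Decidable (Spec_pattern N out) := by unfold Spec_pattern; infer_instance

-- ===== CLAIM (what is proved, stated in full; the proofs are below) =====
def Claim_equal_pattern : Prop := ∀ (N : Int), Dom_pattern N → Spec_pattern N (pattern N)

-- ===== LEMMAS AND PROOFS =====

-- the center of the palindrome: the first value ≤ 0 reached by descending in steps of 5
def patternLast (N : Int) : Int :=
  if N ≤ 0 then N else patternLast (N - 5)
termination_by N.toNat
decreasing_by omega

theorem patternHalf_ne_nil (N : Int) : patternHalf N ≠ [] := by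
  unfold patternHalf
  split <;> simp

theorem patternDown_spec (N : Int) (li : List Int) :
    patternDown N li = (li ++ (patternHalf N).dropLast, patternLast N) := by
  unfold patternDown patternHalf patternLast
  split
  · rename_i h
    rw [patternDown_spec (N - 5) (li ++ [N])]
    rw [if_neg (by omega), if_neg (by omega)]
    rw [List.dropLast_cons_of_ne_nil (patternHalf_ne_nil (N - 5))]
    simp
  · rename_i h
    rw [if_pos (by omega), if_pos (by omega)]
    simp
termination_by N.toNat
decreasing_by omega

-- the ascending loop just appends the ascending run
def ascList (m p : Int) : List Int :=
  if m ≤ p then m :: ascList (m + 5) p else []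
termination_by (p + 5 - m).toNat
decreasing_by omega

theorem patternUp_spec (m p : Int) (li : List Int) :
    patternUp m p li = li ++ ascList m p := by
  unfold patternUp ascList
  split
  · rw [patternUp_spec (m + 5) p (li ++ [m])]
    simp
  · simp
termination_by (p + 5 - m).toNat
decreasing_by omega

theorem patternLast_le (N : Int) : patternLast N ≤ 0 ∧ patternLast N ≤ N := by
  unfold patternLast
  split
  · omega
  · have := patternLast_le (N - 5)
    omega
termination_by N.toNat
decreasing_by omega

theorem patternLast_mod (N : Int) : ∃ k : Nat, N = patternLast N + 5 * k := by
  unfold patternLast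
  split
  · exact ⟨0, by omega⟩
  · obtain ⟨k, hk⟩ := patternLast_mod (N - 5)
    exact ⟨k + 1, by push_cast; omega⟩
termination_by N.toNat
decreasing_by omega

theorem ascList_peel (m : Int) (k : Nat) : ascList m (m + 5 * k) = ascList m (m + 5 * k - 5) ++ [m + 5 * k] := by
  induction k generalizing m with
  | zero =>
      rw [ascList, ascList]
      rw [if_pos (by omega), if_neg (by omega), ascList, if_neg (by omega)]
      simp
  | succ n ih =>
      rw [ascList, if_pos (by omega)]
      have h1 : m + 5 * (↑n + 1 : Nat) = (m + 5) + 5 * n := by push_cast; ring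
      rw [h1, ih (m + 5)]
      conv_rhs => rw [ascList, if_pos (by omega)]
      simp

theorem ascList_eq_reverse (N : Int) : ascList (patternLast N) N = (patternHalf N).reverse := by
  by_cases h : N ≤ 0
  · rw [patternLast, if_pos h, patternHalf, if_pos h]
    rw [ascList, if_pos le_rfl, ascList, if_neg (by omega)]
    simp
  · have hlast : patternLast N = patternLast (N - 5) := by
      rw [patternLast, if_neg h]
    obtain ⟨k, hk⟩ := patternLast_mod N
    have hle := patternLast_le N
    have hk1 : 1 ≤ k := by
      rcases Nat.eq_zero_or_pos k with h0 | h0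
      · omega
      · omega
    have hN : N = patternLast N + 5 * k := hk
    have : ascList (patternLast N) N = ascList (patternLast N) (N - 5) ++ [N] := by
      have := ascList_peel (patternLast N) k
      rw [← hN] at this
      rw [this]
    rw [this, hlast, ascList_eq_reverse (N - 5)]
    conv_rhs => rw [patternHalf]
    rw [if_neg h]
    simp
termination_by N.toNat
decreasing_by omega

theorem slice_mirror (l : List Int) :
    (PySem.List.slice? (PySem.List.slice l none (some (-1))) none none (-1)).getD []
      = l.dropLast.reverse := by
  rw [PySem.List.slice_to_neg_one, PySem.List.slice?_none_none_neg_one]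
  rfl

-- ===== VERDICT (by name: the statement is the Claim_ definition above) =====
theorem pattern_spec : Claim_equal_pattern := by
  intro N _
  show pattern N = pattern_alt N
  unfold pattern pattern_alt
  rw [patternDown_spec, patternUp_spec, ascList_eq_reverse]
  simp only [slice_mirror]
  obtain ⟨d, c, hdc⟩ : ∃ d c, patternHalf N = d ++ [c] := by
    rcases List.eq_nil_or_concat (patternHalf N) with h | ⟨d, c, h⟩
    · exact absurd h (patternHalf_ne_nil N)
    · exact ⟨d, c, by simpa using h⟩
  simp [hdc]
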